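-- pv_equiv track=rewrite | github.com/ANTL-KJH/Python-CodingTest | 프로그래머스/0/181925. 수 조작하기 2/수 조작하기 2.py | solution
-- ===== SOURCE A (Python) =====
-- def solution(numLog):
--     answer = ""
--     for i in range(1, len(numLog)):
--         if numLog[i]-1 == numLog[i-1]:
--             answer +="w"
--         elif numLog[i]-10 == numLog[i-1]:
--             answer += "d"
--         elif numLog[i]+1 == numLog[i-1]:
--             answer +="s"
--         elif numLog[i]+10 == numLog[i-1]:
--             answer +="a"
--
--     return answer
-- ===== SOURCE B (Python) =====
-- def solution(numLog):
--     n = len(numLog)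
--
--     def go(lo, hi):
--         # direction characters for pair indices lo..hi (pair i is numLog[i-1] -> numLog[i])
--         if lo > hi:
--             return ""
--         if lo == hi:
--             d = numLog[lo] - numLog[lo - 1]
--             if d == 1:
--                 return "w"
--             if d == 10:
--                 return "d"
--             if d == -1:
--                 return "s"
--             if d == -10:
--                 return "a"
--             return ""
--         mid = (lo + hi) // 2
--         return go(lo, mid) + go(mid + 1, hi)
--
--     return go(1, n - 1)
-- ===== Notes on version B (the rewrite author's own statement) =====
-- stated objective: alternative
-- what changed: Replaces A's linear indexed loop with a string accumulator by a divide-and-conquer recursion that splits the interval of pair indices at its midpoint and concatenates the two halves' results (correct because string concatenation is associative over the in-order pair intervals).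
import Mathlib
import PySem

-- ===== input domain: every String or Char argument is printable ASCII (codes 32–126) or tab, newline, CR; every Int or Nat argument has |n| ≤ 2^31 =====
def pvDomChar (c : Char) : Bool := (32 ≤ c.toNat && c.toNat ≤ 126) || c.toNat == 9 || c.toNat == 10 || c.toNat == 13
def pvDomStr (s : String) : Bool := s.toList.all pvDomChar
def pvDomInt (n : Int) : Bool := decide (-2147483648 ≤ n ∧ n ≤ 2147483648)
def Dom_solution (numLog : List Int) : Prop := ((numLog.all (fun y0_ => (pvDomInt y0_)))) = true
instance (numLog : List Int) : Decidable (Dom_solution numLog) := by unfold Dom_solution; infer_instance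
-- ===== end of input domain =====

-- B replaces A's linear indexed loop by a divide-and-conquer recursion over the
-- interval of pair indices, concatenating the two halves' results (alternative; same values).

-- ===== PORT A =====
-- answer accumulated as List Char (Python string concatenation); the loop indices are
-- always in range, so numLog[i] is pyGetD with an unused default.
def solution (numLog : List Int) : String :=
  String.ofList ((PySem.List.pyRange 1 (numLog.length : Int) 1).foldl (fun acc i =>
    let x := PySem.List.pyGetD numLog i 0
    let p := PySem.List.pyGetD numLog (i - 1) 0
    if x - 1 = p then acc ++ ['w']
    else if x - 10 = p then acc ++ ['d']
    else if x + 1 = p then acc ++ ['s']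
    else if x + 10 = p then acc ++ ['a']
    else acc) [])

-- ===== PORT B =====
-- go lo hi: direction characters for pair indices lo..hi; the calls keep the indices
-- in range, so numLog[lo] is pyGetD with an unused default.
def goB (numLog : List Int) (lo hi : Int) : List Char :=
  if _h1 : lo > hi then []
  else if _h2 : lo = hi then
    let d := PySem.List.pyGetD numLog lo 0 - PySem.List.pyGetD numLog (lo - 1) 0
    if d = 1 then ['w']
    else if d = 10 then ['d']
    else if d = -1 then ['s']
    else if d = -10 then ['a']
    else []
  else
    let mid := PySem.Int.floordiv (lo + hi) 2
    goB numLog lo mid ++ goB numLog (mid + 1) hi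
termination_by (hi + 1 - lo).toNat
decreasing_by
  · have hlow := (PySem.Int.floordiv_two_mid_bounds (lo := lo) (hi := hi) (by omega)).1
    have hhigh := (PySem.Int.floordiv_lt_iff_lt_mul (a := lo + hi) (b := 2) (q := hi)
      (by omega)).mpr (by omega)
    omega
  · have hlow := (PySem.Int.floordiv_two_mid_bounds (lo := lo) (hi := hi) (by omega)).1
    omega

def solution_alt (numLog : List Int) : String :=
  String.ofList (goB numLog 1 ((numLog.length : Int) - 1))

-- ===== PRECONDITION & SPEC =====
def Spec_solution (numLog : List Int) (out : String) : Prop := out = solution_alt numLog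
instance (numLog : List Int) (out : String) : Decidable (Spec_solution numLog out) := by unfold Spec_solution; infer_instance

-- ===== CLAIM (what is proved, stated in full; the proofs are below) =====
def Claim_equal_solution : Prop := ∀ (numLog : List Int), Dom_solution numLog → Spec_solution numLog (solution numLog)

-- ===== LEMMAS AND PROOFS =====

-- the optional direction character of pair index i
def pairChar (numLog : List Int) (i : Int) : Option Char :=
  let d := PySem.List.pyGetD numLog i 0 - PySem.List.pyGetD numLog (i - 1) 0
  if d = 1 then some 'w'
  else if d = 10 then some 'd'
  else if d = -1 then some 's'
  else if d = -10 then some 'a'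
  else none

-- A's branch cascade appends exactly the optional pair character
lemma branch_eq (numLog : List Int) (i : Int) (acc : List Char) :
    (let x := PySem.List.pyGetD numLog i 0
     let p := PySem.List.pyGetD numLog (i - 1) 0
     if x - 1 = p then acc ++ ['w']
     else if x - 10 = p then acc ++ ['d']
     else if x + 1 = p then acc ++ ['s']
     else if x + 10 = p then acc ++ ['a']
     else acc) = acc ++ (pairChar numLog i).toList := by
  simp only [pairChar]
  split_ifs <;> simp_all <;> omega

-- folding "append the optional char" is filterMap
lemma foldl_opt_append {α β : Type} (g : α → Option β) (xs : List α) (acc : List β) :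
    xs.foldl (fun a x => a ++ (g x).toList) acc = acc ++ xs.filterMap g := by
  induction xs generalizing acc with
  | nil => simp
  | cons x xs ih =>
    cases h : g x <;> simp [List.foldl_cons, h, ih]

-- B's divide-and-conquer produces the in-order filterMap over the pair-index range
lemma goB_eq (numLog : List Int) (lo hi : Int) :
    goB numLog lo hi
      = (PySem.List.pyRange lo (hi + 1) 1).filterMap (pairChar numLog) := by
  by_cases h1 : lo > hi
  · rw [goB, PySem.List.pyRange_one_eq_nil (by omega)]
    simp [h1]
  · by_cases h2 : lo = hi
    · subst h2
      rw [goB, PySem.List.pyRange_one_singleton]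
      simp only [h1, dite_false, dite_true, List.filterMap_cons, List.filterMap_nil, pairChar]
      split_ifs <;> rfl
    · rw [goB]
      simp only [h1, h2, dite_false]
      have hlow := (PySem.Int.floordiv_two_mid_bounds (lo := lo) (hi := hi) (by omega)).1
      have hhigh := (PySem.Int.floordiv_lt_iff_lt_mul (a := lo + hi) (b := 2) (q := hi)
        (by omega)).mpr (by omega)
      set mid := PySem.Int.floordiv (lo + hi) 2 with hm
      rw [goB_eq numLog lo mid, goB_eq numLog (mid + 1) hi,
        PySem.List.pyRange_one_append lo (mid + 1) (hi + 1) (by omega) (by omega),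
        List.filterMap_append]
termination_by (hi + 1 - lo).toNat
decreasing_by
  · omega
  · omega

-- ===== VERDICT (by name: the statement is the Claim_ definition above) =====
theorem solution_spec : Claim_equal_solution := by
  intro numLog _
  unfold Spec_solution solution solution_alt
  rw [goB_eq]
  have : (fun (acc : List Char) (i : Int) =>
      let x := PySem.List.pyGetD numLog i 0
      let p := PySem.List.pyGetD numLog (i - 1) 0
      if x - 1 = p then acc ++ ['w']
      else if x - 10 = p then acc ++ ['d']
      else if x + 1 = p then acc ++ ['s']
      else if x + 10 = p then acc ++ ['a']
      else acc)
      = fun acc i => acc ++ (pairChar numLog i).toList :=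
    funext fun acc => funext fun i => branch_eq numLog i acc
  rw [this, foldl_opt_append]
  have he : (numLog.length : Int) - 1 + 1 = (numLog.length : Int) := by omega
  rw [he]
  simp
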